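-- pv_equiv track=rewrite | github.com/ArR4e/DSProject | processed/K05/S079/kodu3.py | moos
-- ===== SOURCE A (Python) =====
-- def moos(suur, väike, kg):
--     karpide_arv = 0
--     suur_karp = suur
--     väike_karp = väike
--     kaal = kg
--
--     if kaal <= 0:
--         return karpide_arv
--
--     if suur*5 + väike < kaal:
--         return -1
--
--     while suur_karp > 0:
--         karpide_arv += 1
--         kaal -= 5
--         suur_karp -= 1
--         if kaal < 5:
--             break
--
--     if kaal == 0:
--         return karpide_arv
--
--     if väike_karp >= kaal:
--         karpide_arv += kaal
--     else:
--         return -1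
--
--     return karpide_arv
-- ===== SOURCE B (Python) =====
-- def moos(suur, väike, kg):
--     if kg <= 0:
--         return 0
--     if 5 * suur + väike < kg:
--         return -1
--     big = min(max(suur, 0), kg // 5)
--     rem = kg - 5 * big
--     if rem == 0:
--         return big
--     if väike >= rem:
--         return big + rem
--     return -1
-- ===== Notes on version B (the rewrite author's own statement) =====
-- stated objective: faster
-- what changed: Replaces the one-big-box-per-iteration while loop with a closed-form computation: big = min(max(suur,0), kg//5), remainder as small boxes.
-- intended difference: For loads 0<kg<5 with a big box available (suur>0, and väike>=kg-5 except the agreeing kg=3, väike<3 corner), A forces one 5kg box and adds the negative leftover, returning kg-4 or -1; B uses no big box and returns kg if väike>=kg else -1, which is the intended exact-packing answer. — e.g. on moos(1, 5, 4): A returns 0, B returns 4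
import Mathlib
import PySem

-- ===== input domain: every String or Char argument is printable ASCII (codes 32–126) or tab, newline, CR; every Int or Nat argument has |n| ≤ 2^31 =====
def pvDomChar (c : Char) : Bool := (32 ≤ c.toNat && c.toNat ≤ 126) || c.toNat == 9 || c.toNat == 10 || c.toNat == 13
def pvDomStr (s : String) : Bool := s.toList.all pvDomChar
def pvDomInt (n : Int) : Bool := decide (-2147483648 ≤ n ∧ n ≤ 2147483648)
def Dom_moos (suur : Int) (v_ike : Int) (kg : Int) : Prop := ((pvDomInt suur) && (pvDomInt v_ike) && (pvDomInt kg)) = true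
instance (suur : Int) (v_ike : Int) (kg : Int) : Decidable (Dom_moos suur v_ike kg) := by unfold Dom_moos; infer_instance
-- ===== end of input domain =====

-- B replaces A's per-box while loop by the closed-form greedy (big = min(max(suur,0), kg//5)); objective: faster (O(1) vs O(suur)).

-- ===== PORT A =====
-- A's while loop: state (karpide_arv, kaal, suur_karp); breaks when kaal < 5 after a step.
def moosLoop (karpide_arv kaal suur_karp : Int) : Int × Int :=
  if suur_karp > 0 then
    let karpide_arv := karpide_arv + 1
    let kaal := kaal - 5
    let suur_karp := suur_karp - 1
    if kaal < 5 then (karpide_arv, kaal) else moosLoop karpide_arv kaal suur_karp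
  else (karpide_arv, kaal)
termination_by suur_karp.toNat
decreasing_by omega

def moos (suur : Int) (v_ike : Int) (kg : Int) : Int :=
  if kg ≤ 0 then 0
  else if suur * 5 + v_ike < kg then -1
  else
    let r := moosLoop 0 kg suur
    if r.2 = 0 then r.1
    else if v_ike ≥ r.2 then r.1 + r.2
    else -1

-- ===== PORT B =====
def moos_alt (suur : Int) (v_ike : Int) (kg : Int) : Int :=
  if kg ≤ 0 then 0
  else if 5 * suur + v_ike < kg then -1
  else
    let big := min (max suur 0) (PySem.Int.floordiv kg 5)
    let rem := kg - 5 * big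
    if rem = 0 then big
    else if v_ike ≥ rem then big + rem
    else -1

-- ===== PRECONDITION & SPEC =====
-- For loads 0<kg<5 with a big box available (suur>0, väike ≥ kg-5, except the agreeing kg=3, väike<3 corner),
-- A forces one 5kg box and adds the negative leftover (returning kg-4, or -1); B uses no big box and returns
-- kg if väike ≥ kg else -1 — the intended exact-packing answer.
def D_moos (suur : Int) (v_ike : Int) (kg : Int) : Prop :=
  0 < kg ∧ kg < 5 ∧ 0 < suur ∧ kg - 5 ≤ v_ike ∧ ¬(kg = 3 ∧ v_ike < 3)
instance (suur : Int) (v_ike : Int) (kg : Int) : Decidable (D_moos suur v_ike kg) := by unfold D_moos; infer_instance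

def Spec_moos (suur : Int) (v_ike : Int) (kg : Int) (out : Int) : Prop := ¬ D_moos suur v_ike kg → out = moos_alt suur v_ike kg
instance (suur : Int) (v_ike : Int) (kg : Int) (out : Int) : Decidable (Spec_moos suur v_ike kg out) := by unfold Spec_moos; infer_instance

def pvDiffWitness_moos : Int × Int × Int := (1, 5, 4)
def pvDiffWitnessOut_moos : Int × Int := (0, 4)

-- ===== CLAIM =====
def Claim_unchanged_moos : Prop := ∀ (suur : Int) (v_ike : Int) (kg : Int), Dom_moos suur v_ike kg → Spec_moos suur v_ike kg (moos suur v_ike kg)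
def Claim_changed_moos : Prop := Dom_moos (pvDiffWitness_moos.1) (pvDiffWitness_moos.2.1) (pvDiffWitness_moos.2.2) ∧ D_moos (pvDiffWitness_moos.1) (pvDiffWitness_moos.2.1) (pvDiffWitness_moos.2.2) ∧ moos (pvDiffWitness_moos.1) (pvDiffWitness_moos.2.1) (pvDiffWitness_moos.2.2) = pvDiffWitnessOut_moos.1 ∧ moos_alt (pvDiffWitness_moos.1) (pvDiffWitness_moos.2.1) (pvDiffWitness_moos.2.2) = pvDiffWitnessOut_moos.2 ∧ pvDiffWitnessOut_moos.1 ≠ pvDiffWitnessOut_moos.2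
def Claim_exact_moos : Prop := ∀ (suur : Int) (v_ike : Int) (kg : Int), Dom_moos suur v_ike kg → D_moos suur v_ike kg → moos suur v_ike kg ≠ moos_alt suur v_ike kg

-- ===== LEMMAS AND PROOFS =====

-- Closed form of A's loop: with at least one big box it always takes max 1 (min suur (kg/5)) steps.
theorem moosLoop_eq (n : Nat) : ∀ (a k s : Int), 0 < s → s.toNat = n + 1 →
    moosLoop a k s = (a + max 1 (min s (k / 5)), k - 5 * max 1 (min s (k / 5))) := by
  induction n with
  | zero =>
    intro a k s hs hn
    have : s = 1 := by omega
    subst this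
    rw [moosLoop]
    simp only [if_pos hs]
    have h5 : (5:Int) * (k / 5) ≤ k ∧ k < 5 * (k / 5) + 5 := by omega
    by_cases hk : k - 5 < 5
    · simp only [if_pos hk]
      have : max 1 (min (1:Int) (k / 5)) = 1 := by omega
      rw [this]; norm_num
    · simp only [if_neg hk]
      rw [moosLoop]
      have : max 1 (min (1:Int) (k / 5)) = 1 := by omega
      simp [this]
  | succ m ih =>
    intro a k s hs hn
    rw [moosLoop]
    simp only [if_pos hs]
    have h5 : (5:Int) * (k / 5) ≤ k ∧ k < 5 * (k / 5) + 5 := by omega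
    by_cases hk : k - 5 < 5
    · simp only [if_pos hk]
      have : max 1 (min s (k / 5)) = 1 := by omega
      rw [this]; norm_num
    · simp only [if_neg hk]
      have hs1 : 0 < s - 1 := by omega
      rw [ih (a + 1) (k - 5) (s - 1) hs1 (by omega)]
      have hdiv : (k - 5) / 5 = k / 5 - 1 := by omega
      rw [hdiv]
      have h1 : a + 1 + max 1 (min (s - 1) (k / 5 - 1)) = a + max 1 (min s (k / 5)) := by omega
      have h2 : k - 5 - 5 * max 1 (min (s - 1) (k / 5 - 1)) = k - 5 * max 1 (min s (k / 5)) := by omega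
      rw [h1, h2]

theorem moosLoop_closed (a k s : Int) (hs : 0 < s) :
    moosLoop a k s = (a + max 1 (min s (k / 5)), k - 5 * max 1 (min s (k / 5))) :=
  moosLoop_eq (s.toNat - 1) a k s hs (by omega)

theorem moosLoop_none (a k s : Int) (hs : ¬ 0 < s) : moosLoop a k s = (a, k) := by
  rw [moosLoop]; simp [hs]

theorem moos_unfold (suur v_ike kg : Int) (h0 : ¬ kg ≤ 0) (h1 : ¬ suur * 5 + v_ike < kg) :
    moos suur v_ike kg =
      (let r := moosLoop 0 kg suur
       if r.2 = 0 then r.1 else if v_ike ≥ r.2 then r.1 + r.2 else -1) := by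
  rw [moos]; simp [h0, h1]

theorem floordiv_pos (kg : Int) (h : 0 < kg) : PySem.Int.floordiv kg 5 = kg / 5 :=
  PySem.Int.floordiv_eq_ediv_of_pos (by omega)

-- ===== VERDICT =====
theorem moos_spec : Claim_unchanged_moos := by
  intro suur v_ike kg _ hD'
  unfold moos_alt
  by_cases h0 : kg ≤ 0
  · rw [moos]; simp [h0]
  · by_cases h1 : suur * 5 + v_ike < kg
    · rw [moos]; simp [h0, h1]
      omega
    · rw [moos_unfold suur v_ike kg h0 h1]
      simp only [if_neg h0, if_neg (show ¬ 5 * suur + v_ike < kg by omega)]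
      rw [floordiv_pos kg (by omega)]
      have h5 : (5:Int) * (kg / 5) ≤ kg ∧ kg < 5 * (kg / 5) + 5 := by omega
      by_cases hs : 0 < suur
      · rw [moosLoop_closed 0 kg suur hs]
        by_cases hk5 : kg < 5
        · -- 0 < kg < 5, suur > 0: outside D_ means v_ike < kg - 5, or kg = 3 with v_ike < 3
          have hb : max 1 (min suur (kg / 5)) = 1 := by omega
          have hbig : min (max suur 0) (kg / 5) = kg / 5 := by omega
          rw [hb, hbig]
          unfold D_moos at hD'
          push_neg at hD'
          split_ifs <;> omega
        · have hb : max 1 (min suur (kg / 5)) = min (max suur 0) (kg / 5) := by omega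
          rw [hb]
          split_ifs <;> omega
      · rw [moosLoop_none 0 kg suur hs]
        have hbig : min (max suur 0) (kg / 5) = 0 := by omega
        rw [hbig]
        split_ifs <;> omega

theorem moos_changed : Claim_changed_moos := by
  unfold Claim_changed_moos
  refine ⟨by decide, by decide, ?_, by decide, by decide⟩
  show moos 1 5 4 = 0
  rw [moos_unfold 1 5 4 (by decide) (by decide), moosLoop_closed 0 4 1 (by decide)]
  decide

theorem moos_tight : Claim_exact_moos := by
  intro suur v_ike kg _ hD
  obtain ⟨hk0, hk5, hs, hv, hne⟩ := hD
  have h1 : ¬ suur * 5 + v_ike < kg := by omega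
  rw [moos_unfold suur v_ike kg (by omega) h1]
  rw [moosLoop_closed 0 kg suur hs]
  have h5 : (5:Int) * (kg / 5) ≤ kg ∧ kg < 5 * (kg / 5) + 5 := by omega
  have hb : max 1 (min suur (kg / 5)) = 1 := by omega
  rw [hb]
  unfold moos_alt
  rw [floordiv_pos kg (by omega)]
  simp only [if_neg (show ¬ kg ≤ 0 by omega), if_neg (show ¬ 5 * suur + v_ike < kg by omega)]
  have hbig : min (max suur 0) (kg / 5) = 0 := by omega
  rw [hbig]
  split_ifs <;> omega
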